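-- pv_equiv track=rewrite | github.com/ahhhlexli/daily_challenge | day43.py | freed_prisoners
-- ===== SOURCE A (Python) =====
-- def freed_prisoners(l):
--
--     count = 0
--
--     if l[0] == 0:
--         return 0
--
--     for i in range(len(l)):
--         if l[i] == 1:
--             count += 1
--             l = [0 if l[j] == 1 else 1 for j in range(len(l))]
--
--     return count
-- ===== SOURCE B (Python) =====
-- def freed_prisoners(l):
--     # One pass: instead of rebuilding (flipping) the whole array at each 1,
--     # track the flip parity in `count` itself.  After at least one flip the
--     # array holds only 0/1 (any non-1 entry became 1), so the cell currently
--     # reads 1 exactly when (original == 1) coincides with (count is even).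
--     if l[0] == 0:
--         return 0
--     count = 0
--     for x in l:
--         if (x == 1) == (count % 2 == 0):
--             count += 1
--     return count
-- ===== Notes on version B (the rewrite author's own statement) =====
-- stated objective: simpler
-- what changed: B does a single pass tracking the flip parity in the count instead of rebuilding (flipping) the whole list on every 1, removing the inner list comprehension.
import Mathlib
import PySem

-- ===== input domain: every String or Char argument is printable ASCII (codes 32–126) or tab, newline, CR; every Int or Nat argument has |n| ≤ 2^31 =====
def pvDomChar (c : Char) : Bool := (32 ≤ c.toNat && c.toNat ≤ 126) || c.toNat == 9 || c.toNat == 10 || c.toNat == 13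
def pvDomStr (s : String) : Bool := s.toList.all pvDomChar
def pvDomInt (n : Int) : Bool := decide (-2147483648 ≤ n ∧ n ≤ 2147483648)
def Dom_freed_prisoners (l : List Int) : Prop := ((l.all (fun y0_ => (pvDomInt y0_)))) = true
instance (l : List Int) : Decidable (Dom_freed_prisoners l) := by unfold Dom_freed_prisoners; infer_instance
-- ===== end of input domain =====

-- B replaces A's repeated whole-list flips with a simpler single pass tracking flip parity in the count.

-- B replaces A's repeated whole-list flips with a simpler single pass tracking flip parity in the count.

-- ===== PORT A =====
-- A raises IndexError on the empty list (its first statement indexes element zero); Pre_ excludes it, the port returns 0 there.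
def freed_prisoners (l : List Int) : Int :=
  if l.headD 1 = 0 then 0
  else
    ((List.range l.length).foldl
      (fun (st : Int × List Int) i =>
        if st.2.getD i 0 = 1 then
          (st.1 + 1, (List.range st.2.length).map (fun j => if st.2.getD j 0 = 1 then (0 : Int) else 1))
        else st)
      (0, l)).1

-- ===== PORT B =====
-- `(x == 1) == (count % 2 == 0)` in Source B is bool equality, ported as ↔
def freed_prisoners_alt (l : List Int) : Int :=
  if l.headD 1 = 0 then 0
  else
    l.foldl (fun count x => if ((x = 1) ↔ (count % 2 = 0)) then count + 1 else count) 0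

-- ===== PRECONDITION & SPEC =====
-- A indexes the first element before anything else, raising IndexError on the empty list; Pre_ excludes exactly that.
def Pre_freed_prisoners (l : List Int) : Prop := l ≠ []
instance (l : List Int) : Decidable (Pre_freed_prisoners l) := by unfold Pre_freed_prisoners; infer_instance
def pvWitness_freed_prisoners : List Int := [1, 0, 2]
def Spec_freed_prisoners (l : List Int) (out : Int) : Prop := out = freed_prisoners_alt l
instance (l : List Int) (out : Int) : Decidable (Spec_freed_prisoners l out) := by unfold Spec_freed_prisoners; infer_instance

-- ===== CLAIM (what is proved, stated in full; the proofs are below) =====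
def Claim_equal_freed_prisoners : Prop := ∀ (l : List Int), Dom_freed_prisoners l → Pre_freed_prisoners l → Spec_freed_prisoners l (freed_prisoners l)

-- ===== LEMMAS AND PROOFS =====

-- the list A holds after `c` flips of the original `l`
def pvNorm (c : Int) (l : List Int) : List Int :=
  if c = 0 then l
  else l.map (fun x => if ((x = 1) ↔ (c % 2 = 0)) then (1 : Int) else 0)

-- abbreviations for the two step functions
def pvStepA (st : Int × List Int) (i : Nat) : Int × List Int :=
  if st.2.getD i 0 = 1 then
    (st.1 + 1, (List.range st.2.length).map (fun j => if st.2.getD j 0 = 1 then (0 : Int) else 1))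
  else st

def pvStepB (count : Int) (x : Int) : Int :=
  if ((x = 1) ↔ (count % 2 = 0)) then count + 1 else count

lemma pvRangeMap (xs : List Int) (g : Int → Int) :
    (List.range xs.length).map (fun j => g (xs.getD j 0)) = xs.map g := by
  apply List.ext_getElem
  · simp
  · intro i h1 h2
    have h3 : i < xs.length := by simpa using h2
    simp [List.getElem_range, List.getD_eq_getElem?_getD, List.getElem?_eq_getElem h3]

lemma pvNorm_flip (c : Int) (hc : 0 ≤ c) (l : List Int) :
    (List.range (pvNorm c l).length).map
      (fun j => if (pvNorm c l).getD j 0 = 1 then (0 : Int) else 1)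
    = pvNorm (c + 1) l := by
  rw [pvRangeMap (pvNorm c l) (fun x => if x = 1 then (0 : Int) else 1)]
  have hne : c + 1 ≠ 0 := by omega
  have hpar : ((c + 1) % 2 = 0) ↔ ¬(c % 2 = 0) := by omega
  by_cases h0 : c = 0
  · subst h0
    unfold pvNorm
    simp only [if_pos rfl, if_neg hne]
    apply List.map_congr_left
    intro x _
    by_cases hx : x = 1 <;> simp [hx, hpar]
  · unfold pvNorm
    simp only [if_neg h0, if_neg hne, List.map_map]
    apply List.map_congr_left
    intro x _
    by_cases hx : x = 1 <;> by_cases hp : c % 2 = 0 <;>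
      simp [hx, hp, hpar, Function.comp]

lemma pvNorm_getD (c : Int) (l : List Int) (k : Nat) (hk : k < l.length) :
    ((pvNorm c l).getD k 0 = 1) ↔ ((l.getD k 0 = 1) ↔ (c % 2 = 0)) := by
  unfold pvNorm
  by_cases h0 : c = 0
  · subst h0
    simp
  · simp only [if_neg h0]
    rw [List.getD_eq_getElem?_getD, List.getElem?_map, List.getElem?_eq_getElem hk,
        List.getD_eq_getElem?_getD, List.getElem?_eq_getElem hk]
    simp only [Option.map_some, Option.getD_some]
    by_cases hx : l[k] = 1 <;> by_cases hp : c % 2 = 0 <;> simp [hx, hp]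

-- main invariant: processing indices [k, k+m) of A's loop (with the current
-- list being the original flipped `c` times) computes B's fold on `l.drop k`
lemma pvMain (l : List Int) :
    ∀ (m k : Nat) (c : Int), 0 ≤ c → k + m = l.length →
    ((List.range' k m).foldl pvStepA (c, pvNorm c l)).1
      = (l.drop k).foldl pvStepB c := by
  intro m
  induction m with
  | zero =>
    intro k c _ hk
    have : l.drop k = [] := by
      apply List.drop_eq_nil_of_le; omega
    simp [this]
  | succ m ih =>
    intro k c hc hk
    have hklt : k < l.length := by omega
    have hdrop : l.drop k = l.getD k 0 :: l.drop (k + 1) := by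
      rw [List.getD_eq_getElem?_getD, List.getElem?_eq_getElem hklt, Option.getD_some]
      exact List.drop_eq_getElem_cons hklt
    rw [List.range'_succ, hdrop]
    simp only [List.foldl_cons]
    have hstep : pvStepA (c, pvNorm c l) k =
        (pvStepB c (l.getD k 0), pvNorm (pvStepB c (l.getD k 0)) l) := by
      unfold pvStepA pvStepB
      by_cases hcond : (l.getD k 0 = 1) ↔ (c % 2 = 0)
      · have h1 : (pvNorm c l).getD k 0 = 1 := (pvNorm_getD c l k hklt).mpr hcond
        simp only [h1, if_pos rfl, if_pos hcond]
        exact congrArg _ (pvNorm_flip c hc l)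
      · have h1 : ¬ (pvNorm c l).getD k 0 = 1 := fun h => hcond ((pvNorm_getD c l k hklt).mp h)
        simp only [if_neg h1, if_neg hcond]
    rw [hstep]
    have hc' : 0 ≤ pvStepB c (l.getD k 0) := by
      unfold pvStepB; split <;> omega
    exact ih (k + 1) (pvStepB c (l.getD k 0)) hc' (by omega)

-- ===== VERDICT (by name: the statement is the Claim_ definition above) =====
theorem freed_prisoners_spec : Claim_equal_freed_prisoners := by
  intro l _ hpre
  unfold Spec_freed_prisoners freed_prisoners freed_prisoners_alt
  by_cases h0 : l.headD 1 = 0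
  · rw [if_pos h0, if_pos h0]
  · rw [if_neg h0, if_neg h0]
    have h := pvMain l l.length 0 0 le_rfl (by omega)
    rw [List.drop_zero] at h
    have hn : pvNorm 0 l = l := if_pos rfl
    rw [hn] at h
    rw [List.range_eq_range']
    exact h
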